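-- pv_equiv track=rewrite | github.com/prasadbobby/usecase-tests | backend/app.py | find_parent_chain
-- ===== SOURCE A (Python) =====
-- def find_parent_chain(elements, current_id, target_id):
--     """Find chain of parents from current to target"""
--     if current_id == target_id:
--         return [current_id]
--
--     # Find element with current_id
--     current_element = next((e for e in elements if e.get("id") == current_id), None)
--     if not current_element or "parent_id" not in current_element:
--         return []
--
--     parent_id = current_element["parent_id"]
--     parent_chain = find_parent_chain(elements, parent_id, target_id)
--
--     if parent_chain:
--         return [current_id] + parent_chain
--     else:
--         return []
-- ===== SOURCE B (Python) =====
-- def find_parent_chain(elements, current_id, target_id):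
--     """Find chain of parents from current to target (parent-map + bounded path-growing loop)"""
--     parent = {}
--     for e in elements:
--         i = e.get("id")
--         if i is not None and i not in parent:
--             parent[i] = e.get("parent_id")
--     path = [current_id]
--     for _ in elements:
--         last = path[-1]
--         if last == target_id:
--             return path
--         nxt = parent.get(last)
--         if nxt is None:
--             return []
--         path.append(nxt)
--     return path if path[-1] == target_id else []
-- ===== Notes on version B (the rewrite author's own statement) =====
-- stated objective: alternative
-- what changed: Replaces the recursion that rescans the element list at every level with an id->parent_id dict built once plus a single bounded path-growing loop with a trailing target check.
import Mathlib
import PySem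

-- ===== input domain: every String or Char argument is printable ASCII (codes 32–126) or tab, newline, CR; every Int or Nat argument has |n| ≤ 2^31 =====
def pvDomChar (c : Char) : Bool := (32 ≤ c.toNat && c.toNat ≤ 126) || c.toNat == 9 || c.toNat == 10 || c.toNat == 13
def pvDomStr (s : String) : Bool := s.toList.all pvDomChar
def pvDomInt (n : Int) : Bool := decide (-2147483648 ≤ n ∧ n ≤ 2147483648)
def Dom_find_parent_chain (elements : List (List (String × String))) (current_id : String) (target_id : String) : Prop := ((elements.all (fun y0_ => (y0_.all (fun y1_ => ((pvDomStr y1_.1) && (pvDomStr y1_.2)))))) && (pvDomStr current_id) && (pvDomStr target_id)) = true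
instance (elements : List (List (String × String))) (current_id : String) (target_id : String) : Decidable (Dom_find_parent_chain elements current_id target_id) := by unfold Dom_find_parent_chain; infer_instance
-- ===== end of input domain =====

-- B replaces A's recursion-with-rescan by an id->parent map built once plus one bounded path-growing loop with a trailing target check (same return values on Pre_; Pre_ excludes exactly the cyclic walks on which A raises RecursionError, where B returns []).


-- ===== PORT A =====
-- next((e for e in elements if e.get("id") == current_id), None)
def pvFindA (elements : List (List (String × String))) (cid : String) : Option (List (String × String)) :=
  elements.find? (fun e => (PySem.Dict.mk e).get? "id" == some cid)

-- A's recursion, made total with fuel (len(elements)+1 suffices whenever the Python returns;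
-- it only runs out on cyclic parent walks, which Pre_ excludes because Python raises there).
def pvChainA (elements : List (List (String × String))) (target_id : String) : Nat → String → List String
  | 0, _ => []
  | fuel + 1, current_id =>
    if current_id = target_id then [current_id]
    else
      match pvFindA elements current_id with
      | none => []
      | some e =>
        -- "if not current_element or 'parent_id' not in current_element: return []"
        if e = [] ∨ (PySem.Dict.mk e).contains "parent_id" = false then []
        else
          match (PySem.Dict.mk e).get? "parent_id" with
          | none => []
          | some parent_id =>
            let parent_chain := pvChainA elements target_id fuel parent_id
            if parent_chain = [] then [] else current_id :: parent_chain

def find_parent_chain (elements : List (List (String × String))) (current_id : String) (target_id : String) : List String :=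
  pvChainA elements target_id (elements.length + 1) current_id

-- ===== PORT B =====
-- parent = {}; for e in elements: keep the FIRST e.get("parent_id") per id (value may be "None" = Option none)
def pvParentMap (elements : List (List (String × String))) : PySem.Dict String (Option String) :=
  elements.foldl
    (fun m e =>
      match (PySem.Dict.mk e).get? "id" with
      | none => m
      | some i => if m.contains i then m else m.insert i ((PySem.Dict.mk e).get? "parent_id"))
    PySem.Dict.empty

-- the `for _ in elements` loop growing `path`; fuel = remaining iterations; after the loop
-- the trailing `return path if path[-1] == target_id else []`
def pvGrowB (parent : PySem.Dict String (Option String)) (target_id : String) : Nat → List String → List String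
  | 0, path => if PySem.List.pyGet? path (-1) = some target_id then path else []
  | fuel + 1, path =>
    match PySem.List.pyGet? path (-1) with
    | none => []      -- unreachable: path starts nonempty and only grows
    | some last =>
      if last = target_id then path
      else
        match (parent.get? last).getD none with
        | none => []
        | some nxt => pvGrowB parent target_id fuel (path ++ [nxt])

def find_parent_chain_alt (elements : List (List (String × String))) (current_id : String) (target_id : String) : List String :=
  pvGrowB (pvParentMap elements) target_id elements.length [current_id]

-- ===== PRECONDITION & SPEC =====
-- first-match parent step: id -> its element's parent_id (none where A returns [])
def pvStep (elements : List (List (String × String))) (x : String) : Option String :=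
  (pvFindA elements x).bind (fun e => (PySem.Dict.mk e).get? "parent_id")

-- Pre_ excludes EXACTLY the inputs on which A's recursion never terminates (Python raises
-- RecursionError): those with a set S of ids containing current_id, avoiding target_id, whose
-- parent step maps S into S — i.e. the walk from current_id enters a cycle before reaching
-- target_id or a dead end. On every input where A returns a value, Pre_ holds.
def Pre_find_parent_chain (elements : List (List (String × String))) (current_id : String) (target_id : String) : Prop :=
  ¬ ∃ S ∈ ((elements.filterMap (fun e => (PySem.Dict.mk e).get? "id")).toFinset).powerset,
      current_id ∈ S ∧ ∀ x ∈ S, x ≠ target_id ∧ ∃ y ∈ S, pvStep elements x = some y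

instance (elements : List (List (String × String))) (current_id : String) (target_id : String) : Decidable (Pre_find_parent_chain elements current_id target_id) := by
  unfold Pre_find_parent_chain; infer_instance

def pvWitness_find_parent_chain : (List (List (String × String))) × String × String :=
  ([[("id", "a"), ("parent_id", "b")], [("id", "b")]], "a", "b")

def Spec_find_parent_chain (elements : List (List (String × String))) (current_id : String) (target_id : String) (out : List String) : Prop := out = find_parent_chain_alt elements current_id target_id
instance (elements : List (List (String × String))) (current_id : String) (target_id : String) (out : List String) : Decidable (Spec_find_parent_chain elements current_id target_id out) := by unfold Spec_find_parent_chain; infer_instance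

-- ===== CLAIM (what is proved, stated in full; the proofs are below) =====
def Claim_equal_find_parent_chain : Prop := ∀ (elements : List (List (String × String))) (current_id : String) (target_id : String), Dom_find_parent_chain elements current_id target_id → Pre_find_parent_chain elements current_id target_id → Spec_find_parent_chain elements current_id target_id (find_parent_chain elements current_id target_id)

-- ===== LEMMAS AND PROOFS =====

-- Looking up B's parent map is exactly A's first-match scan followed by the "parent_id" lookup.
theorem pvParentMap_get (elements : List (List (String × String))) :
    ∀ (m : PySem.Dict String (Option String)) (x : String),
      (elements.foldl
        (fun m e =>
          match (PySem.Dict.mk e).get? "id" with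
          | none => m
          | some i => if m.contains i then m else m.insert i ((PySem.Dict.mk e).get? "parent_id"))
        m).get? x
      = (m.get? x).or ((pvFindA elements x).map (fun e => (PySem.Dict.mk e).get? "parent_id")) := by
  induction elements with
  | nil => intro m x; simp [pvFindA]
  | cons e es ih =>
    intro m x
    simp only [List.foldl_cons]
    cases hid : (PySem.Dict.mk e).get? "id" with
    | none =>
      have hstep : (match (none : Option String) with
          | none => m
          | some i => if m.contains i then m else m.insert i ((PySem.Dict.mk e).get? "parent_id")) = m := rfl
      have hfind : pvFindA (e :: es) x = pvFindA es x := by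
        unfold pvFindA
        rw [List.find?_cons_of_neg]
        simp [hid]
      rw [hstep, ih, hfind]
    | some i =>
      have hstep : (match (some i : Option String) with
          | none => m
          | some i => if m.contains i then m else m.insert i ((PySem.Dict.mk e).get? "parent_id")) =
          (if m.contains i then m else m.insert i ((PySem.Dict.mk e).get? "parent_id")) := rfl
      rw [hstep]
      by_cases hx : x = i
      · subst hx
        have hfind : pvFindA (e :: es) x = some e := by
          unfold pvFindA
          rw [List.find?_cons_of_pos]
          simp [hid]
        rw [hfind]
        by_cases hc : m.contains x = true
        · rw [if_pos hc, ih]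
          have hs : (m.get? x).isSome = true := by
            rw [← PySem.Dict.contains_eq_isSome_get?]; exact hc
          obtain ⟨v, hv⟩ := Option.isSome_iff_exists.mp hs
          simp [hv]
        · have hn : m.get? x = none := by
            cases h : m.get? x with
            | none => rfl
            | some v =>
              exact absurd (by rw [PySem.Dict.contains_eq_isSome_get?, h]; rfl) hc
          rw [if_neg hc, ih, PySem.Dict.get?_insert_self, hn]
          simp
      · have hfind : pvFindA (e :: es) x = pvFindA es x := by
          unfold pvFindA
          rw [List.find?_cons_of_neg]
          simp only [hid, beq_iff_eq, Option.some.injEq]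
          exact fun h => hx h.symm
        split_ifs with hc
        · rw [ih, hfind]
        · rw [ih, PySem.Dict.get?_insert_of_ne _ _ hx, hfind]

theorem pvParentMap_get' (elements : List (List (String × String))) (x : String) :
    (pvParentMap elements).get? x
      = (pvFindA elements x).map (fun e => (PySem.Dict.mk e).get? "parent_id") := by
  unfold pvParentMap
  rw [pvParentMap_get]
  simp [PySem.Dict.get?_empty]

-- Core relation: B's path-growing loop with fuel k equals A's recursion with fuel k+1
-- (the trailing `path[-1] == target_id` check is A's one extra recursion level).
theorem pvGrow_eq_chain (elements : List (List (String × String))) (target_id : String) :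
    ∀ (fuel : Nat) (pre : List String) (cur : String),
      pvGrowB (pvParentMap elements) target_id fuel (pre ++ [cur]) =
        (if pvChainA elements target_id (fuel + 1) cur = [] then []
         else pre ++ pvChainA elements target_id (fuel + 1) cur) := by
  intro fuel
  induction fuel with
  | zero =>
    intro pre cur
    rw [pvGrowB, PySem.List.pyGet?_neg_one_append_singleton]
    by_cases ht : cur = target_id
    · simp [pvChainA, ht]
    · have hA : pvChainA elements target_id 1 cur = [] := by
        rw [pvChainA]
        simp only [ht, if_false]
        cases hf : pvFindA elements cur with
        | none => simp
        | some e =>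
          cases hp : (PySem.Dict.mk e).get? "parent_id" with
          | none =>
            have hcont : (PySem.Dict.mk e).contains "parent_id" = false := by
              rw [PySem.Dict.contains_eq_isSome_get?, hp]; rfl
            simp [hcont]
          | some p => simp [hp, pvChainA]
      simp [hA, ht]
  | succ f ih =>
    intro pre cur
    rw [pvGrowB, PySem.List.pyGet?_neg_one_append_singleton]
    by_cases ht : cur = target_id
    · simp only [ht]
      rw [pvChainA]
      simp
    · simp only [ht, if_false]
      rw [pvChainA]
      simp only [ht, if_false]
      rw [pvParentMap_get']
      cases hf : pvFindA elements cur with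
      | none => simp
      | some e =>
        have hide : (PySem.Dict.mk e).get? "id" = some cur := by
          simpa using List.find?_some hf
        have hne : ¬ e = [] := by
          intro h; subst h
          simp [PySem.Dict.get?] at hide
        cases hp : (PySem.Dict.mk e).get? "parent_id" with
        | none =>
          have hcont : (PySem.Dict.mk e).contains "parent_id" = false := by
            rw [PySem.Dict.contains_eq_isSome_get?, hp]; rfl
          simp [hp, hne, hcont]
        | some p =>
          have hcont : (PySem.Dict.mk e).contains "parent_id" = true := by
            rw [PySem.Dict.contains_eq_isSome_get?, hp]; rfl
          simp only [Option.map_some, Option.getD_some, hp, hne, hcont,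
            Bool.true_eq_false, or_self, if_false]
          rw [show pre ++ [cur] ++ [p] = (pre ++ [cur]) ++ [p] from rfl, ih (pre ++ [cur]) p]
          cases hch : pvChainA elements target_id (f + 1) p with
          | nil => simp
          | cons a l => simp [List.append_assoc]

-- ===== VERDICT (by name: the statement is the Claim_ definition above) =====
theorem find_parent_chain_spec : Claim_equal_find_parent_chain := by
  intro elements current_id target_id _ _
  unfold Spec_find_parent_chain find_parent_chain find_parent_chain_alt
  have h := pvGrow_eq_chain elements target_id elements.length [] current_id
  rw [List.nil_append] at h
  rw [h]
  cases hc : pvChainA elements target_id (elements.length + 1) current_id <;> simp
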